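-- pv_equiv track=rewrite | github.com/anjaiah01/DSA-Journey | ChangeAltWords.py | changeAltWords
-- ===== SOURCE A (Python) =====
-- def changeAltWords(s):
--     res=""
--     dots=0
--     currWord=""
--     for char in s:
--         if char=="." and dots%2==0:
--             res+=currWord+"."
--             dots+=1
--             currWord=""
--         elif char=="." and dots%2!=0:
--             res+="xyz"+"."
--             currWord=""
--             dots+=1
--         else:
--             currWord+=char
--
--     if dots%2!=0:
--         res=res+"xyz"
--     else:
--         res+=currWord
--     return res
-- ===== SOURCE B (Python) =====
-- def changeAltWords(s):
--     words = s.split(".")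
--     return ".".join("xyz" if i % 2 == 1 else w for i, w in enumerate(words))
-- ===== Notes on version B (the rewrite author's own statement) =====
-- stated objective: idiomatic
-- what changed: Replaces A's character-by-character state machine (dot counter, in-progress word, manual string accumulation) with a word-level split / replace odd-indexed words / join.
import Mathlib
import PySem

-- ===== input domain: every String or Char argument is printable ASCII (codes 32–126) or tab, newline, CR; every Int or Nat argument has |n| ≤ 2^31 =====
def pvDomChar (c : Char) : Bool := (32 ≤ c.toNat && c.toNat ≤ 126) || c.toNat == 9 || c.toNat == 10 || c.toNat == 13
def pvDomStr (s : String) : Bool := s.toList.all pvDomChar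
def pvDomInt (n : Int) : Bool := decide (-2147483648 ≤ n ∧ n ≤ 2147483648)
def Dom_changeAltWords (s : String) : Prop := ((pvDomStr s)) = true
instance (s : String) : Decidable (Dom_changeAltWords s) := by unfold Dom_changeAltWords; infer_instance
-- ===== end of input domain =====

-- B replaces A's character-by-character state machine with an idiomatic split('.') / replace odd-indexed words / join.


-- ===== PORT A =====
-- literal port of A: fold over the characters with state (res, dots, currWord); Python's % is PySem.Int.mod
def changeAltWordsStep (st : List Char × Int × List Char) (char : Char) : List Char × Int × List Char :=
  if char = '.' ∧ PySem.Int.mod st.2.1 2 = 0 then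
    (st.1 ++ st.2.2 ++ ['.'], st.2.1 + 1, [])
  else if char = '.' ∧ PySem.Int.mod st.2.1 2 ≠ 0 then
    (st.1 ++ "xyz".toList ++ ['.'], st.2.1 + 1, [])
  else
    (st.1, st.2.1, st.2.2 ++ [char])

-- the final 'if dots%2!=0' of A
def changeAltWordsFinish (st : List Char × Int × List Char) : List Char :=
  if PySem.Int.mod st.2.1 2 ≠ 0 then st.1 ++ "xyz".toList else st.1 ++ st.2.2

def changeAltWords (s : String) : String :=
  String.ofList (changeAltWordsFinish (s.toList.foldl changeAltWordsStep ([], 0, [])))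

-- ===== PORT B =====
-- literal port of B: words = s.split("."); ".".join("xyz" if i % 2 == 1 else w for i, w in enumerate(words))
def changeAltWords_alt (s : String) : String :=
  String.ofList (PySem.Chars.join ['.']
    ((PySem.List.enumerate (PySem.Chars.splitOn s.toList ['.'])).map
      (fun p => if p.1 % 2 = 1 then "xyz".toList else p.2)))

-- ===== PRECONDITION & SPEC =====
def Spec_changeAltWords (s : String) (out : String) : Prop := out = changeAltWords_alt s
instance (s : String) (out : String) : Decidable (Spec_changeAltWords s out) := by unfold Spec_changeAltWords; infer_instance

-- ===== CLAIM (what is proved, stated in full; the proofs are below) =====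
def Claim_equal_changeAltWords : Prop := ∀ (s : String), Dom_changeAltWords s → Spec_changeAltWords s (changeAltWords s)

-- ===== LEMMAS AND PROOFS =====

-- structural form of Python's split on a single dot
def mySplit : List Char → List (List Char)
  | [] => [[]]
  | c :: t =>
    if c = '.' then [] :: mySplit t
    else match mySplit t with
      | [] => [[c]]
      | w :: ws => (c :: w) :: ws

-- prepend a prefix onto the first word
def prependHead (p : List Char) : List (List Char) → List (List Char)
  | [] => [p]
  | w :: ws => (p ++ w) :: ws

-- what A's loop computes on remaining input l with parity p and current word cw
def gA : List Char → Bool → List Char → List Char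
  | [], p, cw => if p then "xyz".toList else cw
  | c :: t, p, cw =>
    if c = '.' then (if p then "xyz".toList else cw) ++ ['.'] ++ gA t (!p) []
    else gA t p (cw ++ [c])

-- word-level alternating replacement
def hW : List (List Char) → Bool → List Char
  | [], _ => []
  | [w], p => if p then "xyz".toList else w
  | w :: w2 :: ws, p => (if p then "xyz".toList else w) ++ ['.'] ++ hW (w2 :: ws) (!p)

lemma pymod2 (d : Int) : PySem.Int.mod d 2 = d % 2 := by
  simp [PySem.Int.mod, Int.fmod_eq_emod_of_nonneg _ (by norm_num : (0:Int) ≤ 2)]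

lemma mySplit_ne_nil (l : List Char) : mySplit l ≠ [] := by
  cases l with
  | nil => simp [mySplit]
  | cons c t =>
    simp only [mySplit]
    split_ifs
    · simp
    · cases h : mySplit t <;> simp

lemma parity_succ (k : Int) : (decide ((k + 1) % 2 = 1)) = !(decide (k % 2 = 1)) := by
  by_cases h : k % 2 = 1 <;> simp [h] <;> omega

lemma foldA_spec (l : List Char) : ∀ (res : List Char) (dots : Int) (cw : List Char),
    changeAltWordsFinish (l.foldl changeAltWordsStep (res, dots, cw))
    = res ++ gA l (decide (dots % 2 = 1)) cw := by
  induction l with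
  | nil =>
    intro res dots cw
    simp only [List.foldl_nil, gA, changeAltWordsFinish, pymod2]
    rcases Int.emod_two_eq dots with h | h <;> simp [h]
  | cons c t ih =>
    intro res dots cw
    simp only [List.foldl_cons]
    by_cases hc : c = '.'
    · rcases Int.emod_two_eq dots with hd | hd
      · rw [show changeAltWordsStep (res, dots, cw) c = (res ++ cw ++ ['.'], dots + 1, []) by
            simp [changeAltWordsStep, hc, hd]]
        rw [ih, parity_succ]
        simp [gA, hc, hd, List.append_assoc]
      · rw [show changeAltWordsStep (res, dots, cw) c = (res ++ "xyz".toList ++ ['.'], dots + 1, []) by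
            simp [changeAltWordsStep, hc, hd]]
        rw [ih, parity_succ]
        simp [gA, hc, hd, List.append_assoc]
    · rw [show changeAltWordsStep (res, dots, cw) c = (res, dots, cw ++ [c]) by
          simp [changeAltWordsStep, hc]]
      rw [ih]
      simp [gA, hc]

lemma gA_eq_hW (l : List Char) : ∀ (p : Bool) (cw : List Char),
    gA l p cw = hW (prependHead cw (mySplit l)) p := by
  induction l with
  | nil => intro p cw; simp [gA, mySplit, prependHead, hW]
  | cons c t ih =>
    intro p cw
    by_cases hc : c = '.'
    · subst hc
      simp only [gA, mySplit, prependHead]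
      rw [ih (!p) []]
      cases h : mySplit t with
      | nil => exact absurd h (mySplit_ne_nil t)
      | cons w ws => simp [prependHead, hW]
    · simp only [gA, mySplit, if_neg hc]
      rw [ih p (cw ++ [c])]
      cases h : mySplit t with
      | nil => exact absurd h (mySplit_ne_nil t)
      | cons w ws => simp [prependHead]

lemma join_enumerate (ws : List (List Char)) : ∀ (k : Int),
    PySem.Chars.join ['.']
      ((PySem.List.enumerate ws k).map (fun p => if p.1 % 2 = 1 then "xyz".toList else p.2))
    = hW ws (decide (k % 2 = 1)) := by
  induction ws with
  | nil => intro k; simp [PySem.List.enumerate_nil, PySem.Chars.join_nil, hW]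
  | cons w rest ih =>
    intro k
    cases rest with
    | nil =>
      simp only [PySem.List.enumerate_cons, PySem.List.enumerate_nil, List.map, hW]
      rw [PySem.Chars.join_singleton]
      by_cases h : k % 2 = 1 <;> simp [h]
    | cons w2 ws' =>
      rw [PySem.List.enumerate_cons]
      simp only [List.map, PySem.List.enumerate_cons]
      rw [PySem.Chars.join_cons_cons]
      have := ih (k + 1)
      rw [PySem.List.enumerate_cons] at this
      simp only [List.map] at this
      rw [this, parity_succ]
      simp only [hW]
      by_cases h : k % 2 = 1 <;> simp [h]

-- the fuel-based PySem split agrees with the structural mySplit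
lemma splitOn_go_spec (fuel : Nat) : ∀ (l : List Char), l.length < fuel → ∀ (cur : List Char) (acc : List (List Char)),
    PySem.Chars.splitOn.go ['.'] fuel l cur acc = acc.reverse ++ prependHead cur.reverse (mySplit l) := by
  induction fuel with
  | zero => intro l hl; omega
  | succ n ih =>
    intro l hl cur acc
    cases l with
    | nil =>
      simp [PySem.Chars.splitOn.go, mySplit, prependHead]
    | cons c rest =>
      by_cases hc : c = '.'
      · subst hc
        rw [show PySem.Chars.splitOn.go ['.'] (n+1) ('.' :: rest) cur acc
              = PySem.Chars.splitOn.go ['.'] n rest [] (cur.reverse :: acc) by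
            simp [PySem.Chars.splitOn.go, List.isPrefixOf]]
        rw [ih rest (by simp at hl; omega) [] (cur.reverse :: acc)]
        simp only [mySplit, prependHead, List.reverse_cons]
        cases h : mySplit rest with
        | nil => exact absurd h (mySplit_ne_nil rest)
        | cons w ws => simp
      · rw [show PySem.Chars.splitOn.go ['.'] (n+1) (c :: rest) cur acc
              = PySem.Chars.splitOn.go ['.'] n rest (c :: cur) acc by
            simp [PySem.Chars.splitOn.go, List.isPrefixOf]
            intro h; exact absurd h.symm hc]
        rw [ih rest (by simp at hl; omega) (c :: cur) acc]
        simp only [mySplit, List.reverse_cons]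
        rw [if_neg hc]
        cases h : mySplit rest with
        | nil => exact absurd h (mySplit_ne_nil rest)
        | cons w ws => simp [prependHead]

lemma splitOn_eq_mySplit (l : List Char) : PySem.Chars.splitOn l ['.'] = mySplit l := by
  rw [show PySem.Chars.splitOn l ['.'] = PySem.Chars.splitOn.go ['.'] (l.length + 1) l [] [] from rfl]
  rw [splitOn_go_spec (l.length + 1) l (by omega) [] []]
  cases h : mySplit l with
  | nil => exact absurd h (mySplit_ne_nil l)
  | cons w ws => simp [prependHead]

lemma prependHead_nil_of_ne (ws : List (List Char)) (h : ws ≠ []) : prependHead [] ws = ws := by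
  cases ws with
  | nil => exact absurd rfl h
  | cons w ws' => simp [prependHead]

-- ===== VERDICT (by name: the statement is the Claim_ definition above) =====
theorem changeAltWords_spec : Claim_equal_changeAltWords := by
  intro s _
  unfold Spec_changeAltWords changeAltWords changeAltWords_alt
  rw [splitOn_eq_mySplit, join_enumerate (mySplit s.toList) 0, foldA_spec s.toList [] 0 []]
  rw [gA_eq_hW s.toList (decide ((0:Int) % 2 = 1)) []]
  rw [prependHead_nil_of_ne _ (mySplit_ne_nil s.toList)]
  simp
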